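-- pv_equiv track=rewrite | github.com/liujunsheng0/notes | lintcode/take-coins.py | takeCoins
-- ===== SOURCE A (Python) =====
-- def takeCoins(l, k):
--     """
--     左连续 右连续 双指针
--     @param l: The coins
--     @param k: The k
--     @return: The answer
--     """
--     size = len(l)
--     if k >= size:
--         return sum(l)
--     left, right = k - 1, size - 1
--     sum_ = sum(l[:k])
--     ans = sum_
--     while left >= 0:
--         sum_ = sum_ - l[left] + l[right]
--         ans = max(ans, sum_)
--         left -= 1
--         right -= 1
--     # end while
--     return ans
-- ===== SOURCE B (Python) =====
-- def takeCoins(l, k):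
--     n = len(l)
--     if k >= n:
--         return sum(l)
--     pre = [0]
--     s = 0
--     for x in l:
--         s += x
--         pre.append(s)
--     total = pre[n]
--     best = pre[0] + total - pre[n - k]
--     for i in range(1, k + 1):
--         cand = pre[i] + total - pre[n - (k - i)]
--         if cand > best:
--             best = cand
--     return best
-- ===== Notes on version B (the rewrite author's own statement) =====
-- stated objective: alternative
-- what changed: Replaces A's incremental sliding-window update (subtract left coin, add right coin while walking two pointers) with a prefix-sum table built once and a scan over split points i, taking max of pre[i] + total - pre[n-(k-i)].
-- outside the precondition, e.g. on takeCoins([1, 2, 3], -1): A returns 3, B raises IndexError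
import Mathlib
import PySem

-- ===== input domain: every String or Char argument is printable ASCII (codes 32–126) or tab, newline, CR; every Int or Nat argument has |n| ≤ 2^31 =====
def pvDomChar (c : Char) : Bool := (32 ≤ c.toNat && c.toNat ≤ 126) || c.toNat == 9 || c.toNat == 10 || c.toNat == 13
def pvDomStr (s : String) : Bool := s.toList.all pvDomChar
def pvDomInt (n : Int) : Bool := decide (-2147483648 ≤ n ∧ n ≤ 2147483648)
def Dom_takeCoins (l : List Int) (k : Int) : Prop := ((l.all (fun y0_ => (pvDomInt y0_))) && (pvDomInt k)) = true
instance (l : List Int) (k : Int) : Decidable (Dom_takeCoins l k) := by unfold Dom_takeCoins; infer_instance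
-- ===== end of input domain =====

-- B replaces A's two-pointer sliding window with a prefix-sum table plus a scan over split points (alternative decomposition, same cost).


-- ===== PORT A =====
-- the 'while left >= 0' loop of A, step for step
def takeCoinsLoopA (l : List Int) (left right sum_ ans : Int) : Int :=
  if 0 ≤ left then
    let s := sum_ - (PySem.List.pyGet? l left).getD 0 + (PySem.List.pyGet? l right).getD 0
    takeCoinsLoopA l (left - 1) (right - 1) s (max ans s)
  else ans
termination_by (left + 1).toNat
decreasing_by omega

def takeCoins (l : List Int) (k : Int) : Int :=
  let size : Int := l.length
  if k ≥ size then l.sum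
  else
    let sum0 := (PySem.List.slice l none (some k)).sum
    takeCoinsLoopA l (k - 1) (size - 1) sum0 sum0

-- ===== PORT B =====
-- 'pre = [0]; s = 0; for x in l: s += x; pre.append(s)'
def buildPre (l : List Int) : List Int × Int :=
  l.foldl (fun p x => (p.1 ++ [p.2 + x], p.2 + x)) ([0], 0)

def takeCoins_alt (l : List Int) (k : Int) : Int :=
  let n : Int := l.length
  if k ≥ n then l.sum
  else
    let pre := (buildPre l).1
    let total := (PySem.List.pyGet? pre n).getD 0
    let best0 := (PySem.List.pyGet? pre 0).getD 0 + total - (PySem.List.pyGet? pre (n - k)).getD 0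
    (PySem.List.pyRange 1 (k + 1) 1).foldl
      (fun best i =>
        let cand := (PySem.List.pyGet? pre i).getD 0 + total - (PySem.List.pyGet? pre (n - (k - i))).getD 0
        if cand > best then cand else best) best0

-- ===== PRECONDITION & SPEC =====
-- Pre_ excludes negative k, on which A returns the accidental slice value sum(l[:k]) while B's prefix-table
-- indexing pre[n - k] raises IndexError; negative counts are outside the task's natural domain.
def Pre_takeCoins (l : List Int) (k : Int) : Prop := 0 <= k
instance (l : List Int) (k : Int) : Decidable (Pre_takeCoins l k) := by unfold Pre_takeCoins; infer_instance
def pvWitness_takeCoins : List Int × Int := ([1, -2, 3], 2)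

def Spec_takeCoins (l : List Int) (k : Int) (out : Int) : Prop := out = takeCoins_alt l k
instance (l : List Int) (k : Int) (out : Int) : Decidable (Spec_takeCoins l k out) := by unfold Spec_takeCoins; infer_instance

-- ===== CLAIM (what is proved, stated in full; the proofs are below) =====
def Claim_equal_takeCoins : Prop := ∀ (l : List Int) (k : Int), Dom_takeCoins l k → Pre_takeCoins l k → Spec_takeCoins l k (takeCoins l k)

-- ===== LEMMAS AND PROOFS =====
-- partial sums: preS l t = sum of the first t coins
def preS (l : List Int) (t : Nat) : Int := (l.take t).sum

theorem buildPre_aux (l : List Int) : ∀ (acc : List Int) (s : Int),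
    (l.foldl (fun p x => (p.1 ++ [p.2 + x], p.2 + x)) (acc, s)) =
      (acc ++ (List.range l.length).map (fun i => s + preS l (i + 1)), s + l.sum) := by
  induction l with
  | nil => simp [preS]
  | cons x xs ih =>
    intro acc s
    simp only [List.foldl_cons, ih (acc ++ [s + x]) (s + x), List.length_cons,
      List.range_succ_eq_map, List.map_cons, List.map_map]
    refine Prod.ext ?_ (by simp [add_assoc])
    simp only [List.append_assoc, List.singleton_append, preS, List.take_succ_cons,
      List.sum_cons]
    norm_num [add_assoc]

theorem buildPre_fst (l : List Int) :
    (buildPre l).1 = (List.range (l.length + 1)).map (fun i => preS l i) := by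
  rw [buildPre, buildPre_aux, List.range_succ_eq_map]
  simp [preS]

theorem preGetI (l : List Int) (j : Int) (h0 : 0 ≤ j) (h : j ≤ (l.length : Int)) :
    (PySem.List.pyGet? (buildPre l).1 j).getD 0 = preS l j.toNat := by
  rw [PySem.List.pyGet?_of_nonneg (h := h0), buildPre_fst]
  rw [List.getElem?_map, List.getElem?_range (by omega)]
  rfl

theorem preS_succ (l : List Int) (t : Nat) (h : t < l.length) :
    preS l (t + 1) = preS l t + (PySem.List.pyGet? l (t : Int)).getD 0 := by
  rw [PySem.List.pyGet?_natCast, List.getElem?_eq_getElem h]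
  exact List.sum_take_succ l t h

theorem preS_length (l : List Int) : preS l l.length = l.sum := by
  simp [preS]

-- B's fold equals a running max over the candidate values gg

-- the candidate value for the split 't coins from the left, k - t coins from the right'
def gg (l : List Int) (kn t : Nat) : Int := preS l t + l.sum - preS l (l.length - (kn - t))

theorem gg_step (l : List Int) (kn m : Nat) (hm : m < kn) (hk : kn < l.length) :
    gg l kn (m + 1) - (PySem.List.pyGet? l (m : Int)).getD 0
      + (PySem.List.pyGet? l ((l.length - kn + m : Nat) : Int)).getD 0 = gg l kn m := by
  have h1 : preS l (m + 1) = preS l m + (PySem.List.pyGet? l (m : Int)).getD 0 :=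
    preS_succ l m (by omega)
  have h2 : preS l (l.length - kn + m + 1) =
      preS l (l.length - kn + m) + (PySem.List.pyGet? l ((l.length - kn + m : Nat) : Int)).getD 0 :=
    preS_succ l _ (by omega)
  have e1 : l.length - (kn - (m + 1)) = l.length - kn + m + 1 := by omega
  have e2 : l.length - (kn - m) = l.length - kn + m := by omega
  rw [gg, gg, e1, e2, h1, h2]
  ring

theorem loopA_spec (l : List Int) (kn : Nat) (hk : kn < l.length) : ∀ (m : Nat), m < kn → ∀ (ans : Int),
    ((takeCoinsLoopA l (m : Int) ((l.length - kn + m : Nat) : Int) (gg l kn (m + 1)) ans = ans ∨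
       ∃ t ≤ m, takeCoinsLoopA l (m : Int) ((l.length - kn + m : Nat) : Int) (gg l kn (m + 1)) ans = gg l kn t) ∧
      ans ≤ takeCoinsLoopA l (m : Int) ((l.length - kn + m : Nat) : Int) (gg l kn (m + 1)) ans ∧
      ∀ t ≤ m, gg l kn t ≤ takeCoinsLoopA l (m : Int) ((l.length - kn + m : Nat) : Int) (gg l kn (m + 1)) ans) := by
  intro m
  induction m with
  | zero =>
    intro hm ans
    rw [takeCoinsLoopA]
    simp only [Nat.cast_zero, le_refl, if_pos]
    have hs : gg l kn (0 + 1) - (PySem.List.pyGet? l ((0 : Nat) : Int)).getD 0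
        + (PySem.List.pyGet? l ((l.length - kn + 0 : Nat) : Int)).getD 0 = gg l kn 0 :=
      gg_step l kn 0 hm hk
    simp only [Nat.cast_zero] at hs
    rw [hs, takeCoinsLoopA, if_neg (by omega : ¬ (0:Int) ≤ 0 - 1)]
    refine ⟨?_, le_max_left _ _, ?_⟩
    · rcases max_choice ans (gg l kn 0) with h | h
      · exact Or.inl h
      · exact Or.inr ⟨0, le_refl _, h⟩
    · intro t ht
      interval_cases t
      exact le_max_right _ _
  | succ m ih =>
    intro hm ans
    rw [takeCoinsLoopA]
    have h0 : (0 : Int) ≤ ((m + 1 : Nat) : Int) := by omega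
    rw [if_pos h0]
    have hs : gg l kn (m + 1 + 1) - (PySem.List.pyGet? l ((m + 1 : Nat) : Int)).getD 0
        + (PySem.List.pyGet? l ((l.length - kn + (m + 1) : Nat) : Int)).getD 0 = gg l kn (m + 1) :=
      gg_step l kn (m + 1) hm hk
    have e1 : ((m + 1 : Nat) : Int) - 1 = ((m : Nat) : Int) := by omega
    have e2 : ((l.length - kn + (m + 1) : Nat) : Int) - 1 = ((l.length - kn + m : Nat) : Int) := by omega
    simp only [hs, e1, e2]
    obtain ⟨hmem, hle, hall⟩ := ih (by omega) (max ans (gg l kn (m + 1)))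
    refine ⟨?_, le_trans (le_max_left _ _) hle, ?_⟩
    · rcases hmem with h | ⟨t, ht, h⟩
      · rcases max_choice ans (gg l kn (m + 1)) with h2 | h2
        · exact Or.inl (h.trans h2)
        · exact Or.inr ⟨m + 1, le_refl _, h.trans h2⟩
      · exact Or.inr ⟨t, by omega, h⟩
    · intro t ht
      by_cases h : t ≤ m
      · exact hall t h
      · have : t = m + 1 := by omega
        subst this
        exact le_trans (le_max_right _ _) hle

-- B's fold equals a running max over the candidate values gg
theorem alt_eq_fold (l : List Int) (k : Int) (h0 : 0 ≤ k) (hk : k < (l.length : Int)) :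
    takeCoins_alt l k =
      ((List.range k.toNat).map (fun j => gg l k.toNat (j + 1))).foldl max (gg l k.toNat 0) := by
  have hn : k.toNat ≤ l.length := by omega
  rw [takeCoins_alt]
  simp only [ge_iff_le, not_le.mpr hk, if_false]
  have hrange : PySem.List.pyRange 1 (k + 1) 1 = (List.range k.toNat).map (fun j => ((1 + j : Nat) : Int)) := by
    rw [PySem.List.pyRange_one, add_sub_cancel_right]
    exact List.map_congr_left (fun j _ => by push_cast; ring)
  rw [hrange, List.foldl_map]
  have hbest0 : (PySem.List.pyGet? (buildPre l).1 0).getD 0 +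
      (PySem.List.pyGet? (buildPre l).1 (l.length : Int)).getD 0 -
      (PySem.List.pyGet? (buildPre l).1 ((l.length : Int) - k)).getD 0 = gg l k.toNat 0 := by
    rw [preGetI l 0 (by omega) (by omega), preGetI l _ (by omega) (by omega),
        preGetI l ((l.length : Int) - k) (by omega) (by omega)]
    have : ((l.length : Int) - k).toNat = l.length - (k.toNat - 0) := by omega
    rw [gg, Int.toNat_zero, Int.toNat_natCast, preS_length, this]
  rw [hbest0]
  rw [PySem.List.foldl_congr_mem (g := fun b j => max b (gg l k.toNat (j + 1)))]
  · rw [← List.foldl_map]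
  · intro acc j hj
    rw [List.mem_range] at hj
    have hcand : (PySem.List.pyGet? (buildPre l).1 ((1 + j : Nat) : Int)).getD 0 +
        (PySem.List.pyGet? (buildPre l).1 (l.length : Int)).getD 0 -
        (PySem.List.pyGet? (buildPre l).1 ((l.length : Int) - (k - ((1 + j : Nat) : Int)))).getD 0 =
        gg l k.toNat (j + 1) := by
      rw [preGetI l _ (by omega) (by omega), preGetI l _ (by omega) (by omega),
          preGetI l _ (by omega) (by omega)]
      have e2 : ((l.length : Int) - (k - ((1 + j : Nat) : Int))).toNat = l.length - (k.toNat - (j + 1)) := by omega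
      rw [gg]
      simp only [Int.toNat_natCast]
      rw [preS_length, e2, Nat.add_comm 1 j]
    simp only [hcand]
    rcases lt_or_ge acc (gg l k.toNat (j + 1)) with h | h
    · simp [h, max_eq_right (le_of_lt h)]
    · simp [not_lt.mpr h, max_eq_left h]

theorem main_eq (l : List Int) (k : Int) (h0 : 0 ≤ k) : takeCoins l k = takeCoins_alt l k := by
  by_cases hge : k ≥ (l.length : Int)
  · rw [takeCoins, takeCoins_alt]
    simp [hge]
  · rw [not_le] at hge
    rw [alt_eq_fold l k h0 hge, takeCoins]
    simp only [ge_iff_le, not_le.mpr hge, if_false]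
    rw [PySem.List.slice_to l h0]
    have hkn : k.toNat ≤ l.length := by omega
    rcases Nat.eq_zero_or_pos k.toNat with hz | hpos
    · -- k = 0: the while loop does not run; both sides are 0
      have hk0 : k = 0 := by omega
      subst hk0
      rw [takeCoinsLoopA, if_neg (by omega : ¬ (0:Int) ≤ 0 - 1)]
      simp [hz, gg, preS]
    · -- k ≥ 1
      set kn := k.toNat with hknd
      have e1 : k - 1 = ((kn - 1 : Nat) : Int) := by omega
      have e2 : (l.length : Int) - 1 = ((l.length - kn + (kn - 1) : Nat) : Int) := by omega
      have ekn : (kn - 1) + 1 = kn := by omega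
      have hsum : (l.take k.toNat).sum = gg l kn ((kn - 1) + 1) := by
        rw [ekn, gg]
        have h3 : l.length - (kn - kn) = l.length := by omega
        rw [h3, preS_length, preS]
        ring
      rw [e1, e2, hsum]
      obtain ⟨hmem, hle, hall⟩ := loopA_spec l kn (by omega) (kn - 1) (by omega) (gg l kn ((kn - 1) + 1))
      set Aval := takeCoinsLoopA l ((kn - 1 : Nat) : Int) ((l.length - kn + (kn - 1) : Nat) : Int)
        (gg l kn ((kn - 1) + 1)) (gg l kn ((kn - 1) + 1)) with hA
      set ys := (List.range kn).map (fun j => gg l kn (j + 1)) with hys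
      obtain ⟨hinit, hys_le⟩ := PySem.List.le_foldl_max ys (gg l kn 0)
      have hBmem := PySem.List.foldl_max_mem ys (gg l kn 0)
      set Bval := ys.foldl max (gg l kn 0) with hB
      have hallB : ∀ t ≤ kn, gg l kn t ≤ Bval := by
        intro t ht
        rcases Nat.eq_zero_or_pos t with rfl | htp
        · exact hinit
        · refine hys_le _ ?_
          rw [hys, List.mem_map]
          exact ⟨t - 1, List.mem_range.mpr (by omega), by rw [Nat.sub_add_cancel htp]⟩
      have hallA : ∀ t ≤ kn, gg l kn t ≤ Aval := by
        intro t ht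
        by_cases h : t ≤ kn - 1
        · exact hall t h
        · have : t = kn := by omega
          subst this
          have h2 := hle
          rw [ekn] at h2
          exact h2
      apply le_antisymm
      · rcases hmem with h | ⟨t, ht, h⟩
        · rw [h]
          have h2 : gg l kn ((kn - 1) + 1) ≤ Bval := by
            rw [ekn]
            exact hallB kn (le_refl _)
          exact h2
        · rw [h]
          exact hallB t (by omega)
      · rcases hBmem with h | h
        · rw [h]
          exact hallA 0 (by omega)
        · rw [hys, List.mem_map] at h
          obtain ⟨j, hj, hjy⟩ := h
          rw [← hjy]
          exact hallA (j + 1) (by rw [List.mem_range] at hj; omega)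

-- ===== VERDICT (by name: the statement is the Claim_ definition above) =====
theorem takeCoins_spec : Claim_equal_takeCoins := by
  intro l k _ hpre
  show takeCoins l k = takeCoins_alt l k
  exact main_eq l k hpre
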